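-- pv_equiv track=rewrite | github.com/gordonpn/solutions | winning_sequence.py | winning_sequence
-- ===== SOURCE A (Python) =====
-- def winning_sequence(num: int, lower_end: int, upper_end: int):
--     possibilities = (upper_end - lower_end) * 2 + 1
--     if possibilities < num:
--         return [-1]
--     results = []
--
--     decreasing_half = range(min(num - 1, upper_end - lower_end + 1))
--     for digit in decreasing_half:
--         results.append(upper_end - digit)
--     increasing_half = range(num - len(results))
--     for digit in increasing_half:
--         results.insert(0, upper_end - 1 - digit)
--
--     return results
-- ===== SOURCE B (Python) =====
-- def winning_sequence(num: int, lower_end: int, upper_end: int):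
--     if (upper_end - lower_end) * 2 + 1 < num:
--         return [-1]
--     k = max(0, min(num - 1, upper_end - lower_end + 1))
--     peak = num - k
--     return [upper_end - abs(i - peak) for i in range(num)]
-- ===== Notes on version B (the rewrite author's own statement) =====
-- stated objective: simpler
-- what changed: Replaces A's two directional loops (appending the falling half, then insert(0,...) building the rising half) with a single closed-form comprehension upper_end - abs(i - peak) over range(num).
import Mathlib
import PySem

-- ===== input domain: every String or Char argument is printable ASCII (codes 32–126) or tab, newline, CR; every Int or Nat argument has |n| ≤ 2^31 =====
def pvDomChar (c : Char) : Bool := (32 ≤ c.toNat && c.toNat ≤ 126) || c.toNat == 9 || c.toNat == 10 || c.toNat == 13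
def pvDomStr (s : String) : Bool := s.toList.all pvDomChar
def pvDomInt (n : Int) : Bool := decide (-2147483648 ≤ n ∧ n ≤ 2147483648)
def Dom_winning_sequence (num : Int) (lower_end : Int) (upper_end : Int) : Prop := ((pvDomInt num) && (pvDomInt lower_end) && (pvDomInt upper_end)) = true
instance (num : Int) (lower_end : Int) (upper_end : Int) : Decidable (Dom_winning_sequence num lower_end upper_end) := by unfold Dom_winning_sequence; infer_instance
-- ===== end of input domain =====

-- B replaces A's two directional loops (append-half then insert(0,…)-half) by one
-- closed-form comprehension upper_end - |i - peak| over range(num); objective: simpler.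

-- ===== PORT A =====
def winning_sequence (num : Int) (lower_end : Int) (upper_end : Int) : List Int :=
  let possibilities := (upper_end - lower_end) * 2 + 1
  if possibilities < num then [-1]
  else
    let results : List Int := []
    -- for digit in range(min(num - 1, upper_end - lower_end + 1)): results.append(upper_end - digit)
    let results := (PySem.List.pyRange 0 (min (num - 1) (upper_end - lower_end + 1)) 1).foldl
      (fun acc digit => acc ++ [upper_end - digit]) results
    -- for digit in range(num - len(results)): results.insert(0, upper_end - 1 - digit)
    let results := (PySem.List.pyRange 0 (num - (results.length : Int)) 1).foldl
      (fun acc digit => (upper_end - 1 - digit) :: acc) results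
    results

-- ===== PORT B =====
def winning_sequence_alt (num : Int) (lower_end : Int) (upper_end : Int) : List Int :=
  if (upper_end - lower_end) * 2 + 1 < num then [-1]
  else
    let k := max 0 (min (num - 1) (upper_end - lower_end + 1))
    let peak := num - k
    (PySem.List.pyRange 0 num 1).map (fun i => upper_end - |i - peak|)

-- ===== PRECONDITION & SPEC =====
def Spec_winning_sequence (num : Int) (lower_end : Int) (upper_end : Int) (out : List Int) : Prop := out = winning_sequence_alt num lower_end upper_end
instance (num : Int) (lower_end : Int) (upper_end : Int) (out : List Int) : Decidable (Spec_winning_sequence num lower_end upper_end out) := by unfold Spec_winning_sequence; infer_instance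

-- ===== CLAIM (what is proved, stated in full; the proofs are below) =====
def Claim_equal_winning_sequence : Prop := ∀ (num : Int) (lower_end : Int) (upper_end : Int), Dom_winning_sequence num lower_end upper_end → Spec_winning_sequence num lower_end upper_end (winning_sequence num lower_end upper_end)

-- ===== LEMMAS AND PROOFS =====

-- A's first loop (append at the tail) is a map over the range.
theorem pv_foldl_append {f : Int → Int} : ∀ (l : List Int) (init : List Int),
    l.foldl (fun acc d => acc ++ [f d]) init = init ++ l.map f := by
  intro l
  induction l with
  | nil => simp
  | cons x xs ih => intro init; simp [List.foldl, ih]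

-- A's second loop (insert at position 0) is a reversed map prepended.
theorem pv_foldl_cons {f : Int → Int} : ∀ (l : List Int) (init : List Int),
    l.foldl (fun acc d => f d :: acc) init = (l.map f).reverse ++ init := by
  intro l
  induction l with
  | nil => simp
  | cons x xs ih => intro init; simp [List.foldl, ih]

theorem winning_sequence_spec : Claim_equal_winning_sequence := by
  intro num lower_end upper_end _
  unfold Spec_winning_sequence winning_sequence winning_sequence_alt
  by_cases hguard : (upper_end - lower_end) * 2 + 1 < num
  · simp [hguard]
  · simp only [hguard, if_false]
    rw [PySem.List.pyRange_one]
    rw [pv_foldl_append]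
    simp only [List.nil_append, List.length_map, List.length_range]
    rw [PySem.List.pyRange_one, pv_foldl_cons, PySem.List.pyRange_one]
    simp only [List.map_map]
    set U := upper_end with hU
    set L := lower_end with hL
    set k' : Nat := (min (num - 1) (U - L + 1) - 0).toNat with hk'
    set m' : Nat := (num - (k' : Int) - 0).toNat with hm'
    set n' : Nat := (num - 0).toNat with hn'
    set peak : Int := num - max 0 (min (num - 1) (U - L + 1)) with hpeak
    apply List.ext_getElem
    · simp only [List.length_append, List.length_reverse, List.length_map, List.length_range]
      omega
    · intro i h1 h2
      simp only [List.length_append, List.length_reverse, List.length_map, List.length_range] at h1 h2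
      by_cases hi : i < m'
      · rw [List.getElem_append_left (by simpa using hi)]
        simp only [List.getElem_reverse, List.getElem_map, List.getElem_range, Function.comp_apply,
          List.length_map, List.length_range]
        rw [abs_of_nonpos (by omega)]
        omega
      · rw [List.getElem_append_right (by simpa using hi)]
        simp only [List.getElem_map, List.getElem_range, Function.comp_apply, List.length_reverse,
          List.length_map, List.length_range]
        rw [abs_of_nonneg (by omega)]
        omega

-- ===== VERDICT (by name: the statement is the Claim_ definition above) =====
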